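-- pv_equiv track=rewrite | github.com/MteaHubHug/BioinformaticsAlgorithms | ALGORITMI U BIOINFORMATICI/BioinformaticsAlgorithms_by_Matea/GenomeAssembling.py | get_unique_k_minus_mers
-- ===== SOURCE A (Python) =====
-- def get_prefix(kmer):
--     prefix = kmer[:-1]
--     return prefix
--
-- def get_sufix(kmer):
--     sufix = kmer[1:]
--     return sufix
--
-- def get_unique_k_minus_mers(Patterns):
--     nodes = []
--     for kmer in Patterns:
--         prefix = get_prefix(kmer)
--         sufix = get_sufix(kmer)
--         nodes.append(prefix)
--         nodes.append(sufix)
--     nodes = list(set(nodes))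
--     nodes.sort()
--     return nodes
-- ===== SOURCE B (Python) =====
-- def get_unique_k_minus_mers(Patterns):
--     nodes = []
--     for kmer in Patterns:
--         for node in (kmer[:-1], kmer[1:]):
--             i = 0
--             while i < len(nodes) and nodes[i] < node:
--                 i += 1
--             if i == len(nodes) or nodes[i] != node:
--                 nodes.insert(i, node)
--     return nodes
-- ===== Notes on version B (the rewrite author's own statement) =====
-- stated objective: alternative
-- what changed: B never builds a set and never calls sort: it maintains a single always-sorted duplicate-free list, inserting each prefix/suffix at its ordered position (skipping it when already present), so the answer is ready the moment the scan ends; this trades A's hash+sort for O(n*u) ordered insertion.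
import Mathlib
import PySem

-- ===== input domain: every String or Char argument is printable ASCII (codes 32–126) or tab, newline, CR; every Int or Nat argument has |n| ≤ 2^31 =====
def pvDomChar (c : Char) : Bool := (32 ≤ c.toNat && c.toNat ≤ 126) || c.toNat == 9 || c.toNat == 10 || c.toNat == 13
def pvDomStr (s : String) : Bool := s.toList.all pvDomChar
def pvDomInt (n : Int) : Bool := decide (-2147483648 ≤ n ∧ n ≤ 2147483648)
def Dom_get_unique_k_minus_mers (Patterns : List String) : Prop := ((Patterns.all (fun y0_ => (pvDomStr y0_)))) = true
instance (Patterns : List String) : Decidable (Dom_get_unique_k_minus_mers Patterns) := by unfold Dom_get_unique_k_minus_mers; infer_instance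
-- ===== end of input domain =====

-- B replaces A's set-then-sort with incremental ordered insertion: it keeps one
-- always-sorted duplicate-free list and inserts each prefix/suffix in place
-- (alternative decomposition: no set, no sort call).


-- ===== PORT A =====
def get_prefix (kmer : String) : String := PySem.Str.slice kmer none (some (-1))

def get_sufix (kmer : String) : String := PySem.Str.slice kmer (some 1) none

def get_unique_k_minus_mers (Patterns : List String) : List String :=
  let nodes := Patterns.foldl
    (fun acc kmer => (acc ++ [get_prefix kmer]) ++ [get_sufix kmer]) []
  let nodes := PySem.Set.ofList nodes      -- list(set(nodes)); consumed only by the keyless sort below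
  PySem.List.sorted nodes (fun x => x) false

-- ===== PORT B =====
-- B's inner `while i < len(nodes) and nodes[i] < node` scan followed by the
-- conditional `nodes.insert(i, node)`, as structural recursion over the scanned list.
def pvIns (node : String) : List String → List String
  | [] => [node]                                        -- i == len(nodes): append
  | y :: ys =>
    if y < node then y :: pvIns node ys                 -- advance i past nodes[i] < node
    else if y ≠ node then node :: y :: ys               -- nodes[i] != node: insert at i
    else y :: ys                                        -- already present: skip

def get_unique_k_minus_mers_alt (Patterns : List String) : List String :=
  Patterns.foldl
    (fun nodes kmer =>
      [PySem.Str.slice kmer none (some (-1)), PySem.Str.slice kmer (some 1) none].foldl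
        (fun ns node => pvIns node ns) nodes)
    []

-- ===== PRECONDITION & SPEC =====
def Spec_get_unique_k_minus_mers (Patterns : List String) (out : List String) : Prop := out = get_unique_k_minus_mers_alt Patterns
instance (Patterns : List String) (out : List String) : Decidable (Spec_get_unique_k_minus_mers Patterns out) := by unfold Spec_get_unique_k_minus_mers; infer_instance

-- ===== CLAIM =====
def Claim_equal_get_unique_k_minus_mers : Prop := ∀ (Patterns : List String), Dom_get_unique_k_minus_mers Patterns → Spec_get_unique_k_minus_mers Patterns (get_unique_k_minus_mers Patterns)

-- ===== LEMMAS AND PROOFS =====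

theorem pvIns_mem (node : String) (S : List String) (y : String) :
    y ∈ pvIns node S ↔ y = node ∨ y ∈ S := by
  induction S with
  | nil => simp [pvIns]
  | cons x S ih =>
    by_cases h1 : x < node
    · simp only [pvIns, if_pos h1, List.mem_cons, ih]; tauto
    · by_cases h2 : x = node
      · subst h2; simp only [pvIns, if_neg h1, ne_eq, not_true_eq_false, if_false,
          List.mem_cons]; tauto
      · simp only [pvIns, if_neg h1, ne_eq, h2, not_false_eq_true, if_true, List.mem_cons]

theorem pvIns_pairwise (node : String) (S : List String)
    (h : S.Pairwise (· < ·)) : (pvIns node S).Pairwise (· < ·) := by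
  induction S with
  | nil => exact List.pairwise_singleton _ _
  | cons x S ih =>
    rcases List.pairwise_cons.mp h with ⟨hx, hS⟩
    by_cases h1 : x < node
    · rw [show pvIns node (x :: S) = x :: pvIns node S from by
        simp only [pvIns, if_pos h1]]
      refine List.pairwise_cons.mpr ⟨?_, ih hS⟩
      intro y hy
      rcases (pvIns_mem node S y).mp hy with rfl | hyS
      · exact h1
      · exact hx y hyS
    · by_cases h2 : x = node
      · subst h2
        rw [show pvIns x (x :: S) = x :: S from by
          simp only [pvIns, if_neg h1, ne_eq, not_true_eq_false, if_false]]
        exact h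
      · have hnx : node < x := lt_of_le_of_ne (not_lt.mp h1) (Ne.symm h2)
        rw [show pvIns node (x :: S) = node :: x :: S from by
          simp only [pvIns, if_neg h1, ne_eq, h2, not_false_eq_true, if_true]]
        refine List.pairwise_cons.mpr ⟨?_, h⟩
        intro y hy
        rcases List.mem_cons.mp hy with rfl | hyS
        · exact hnx
        · exact lt_trans hnx (hx y hyS)

-- B's fold preserves strict sortedness and accumulates exactly the prefixes/suffixes.
theorem pvB_inv (P : List String) : ∀ (acc : List String), acc.Pairwise (· < ·) →
    (P.foldl (fun nodes kmer =>
        [PySem.Str.slice kmer none (some (-1)), PySem.Str.slice kmer (some 1) none].foldl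
          (fun ns node => pvIns node ns) nodes) acc).Pairwise (· < ·)
    ∧ ∀ y, y ∈ P.foldl (fun nodes kmer =>
        [PySem.Str.slice kmer none (some (-1)), PySem.Str.slice kmer (some 1) none].foldl
          (fun ns node => pvIns node ns) nodes) acc
        ↔ y ∈ acc ∨ ∃ k ∈ P, y = get_prefix k ∨ y = get_sufix k := by
  induction P with
  | nil => intro acc h; exact ⟨h, by simp⟩
  | cons p P ih =>
    intro acc hacc
    have hstep : ([PySem.Str.slice p none (some (-1)), PySem.Str.slice p (some 1) none].foldl
        (fun ns node => pvIns node ns) acc)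
        = pvIns (PySem.Str.slice p (some 1) none) (pvIns (PySem.Str.slice p none (some (-1))) acc) := by
      rfl
    have hpw : (pvIns (PySem.Str.slice p (some 1) none)
        (pvIns (PySem.Str.slice p none (some (-1))) acc)).Pairwise (· < ·) :=
      pvIns_pairwise _ _ (pvIns_pairwise _ _ hacc)
    obtain ⟨h1, h2⟩ := ih _ hpw
    refine ⟨by rw [List.foldl_cons, hstep]; exact h1, ?_⟩
    intro y
    rw [List.foldl_cons, hstep, h2 y, pvIns_mem, pvIns_mem]
    simp only [List.mem_cons, get_prefix, get_sufix]
    constructor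
    · rintro ((rfl | rfl | hy) | ⟨k, hk, hy⟩)
      · exact Or.inr ⟨p, Or.inl rfl, Or.inr rfl⟩
      · exact Or.inr ⟨p, Or.inl rfl, Or.inl rfl⟩
      · exact Or.inl hy
      · exact Or.inr ⟨k, Or.inr hk, hy⟩
    · rintro (hy | ⟨k, (rfl | hk), (rfl | rfl)⟩)
      · exact Or.inl (Or.inr (Or.inr hy))
      · exact Or.inl (Or.inr (Or.inl rfl))
      · exact Or.inl (Or.inl rfl)
      · exact Or.inr ⟨k, hk, Or.inl rfl⟩
      · exact Or.inr ⟨k, hk, Or.inr rfl⟩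

-- Membership in A's appended nodes list.
theorem pvA_mem (P : List String) : ∀ (acc : List String) (y : String),
    y ∈ P.foldl (fun acc kmer => (acc ++ [get_prefix kmer]) ++ [get_sufix kmer]) acc
      ↔ y ∈ acc ∨ ∃ k ∈ P, y = get_prefix k ∨ y = get_sufix k := by
  induction P with
  | nil => intro acc y; simp
  | cons p P ih =>
    intro acc y
    rw [List.foldl_cons, ih]
    simp only [List.mem_append, List.mem_cons, List.not_mem_nil, or_false]
    constructor
    · rintro (((hy | rfl) | rfl) | ⟨k, hk, hy⟩)
      · exact Or.inl hy
      · exact Or.inr ⟨p, Or.inl rfl, Or.inl rfl⟩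
      · exact Or.inr ⟨p, Or.inl rfl, Or.inr rfl⟩
      · exact Or.inr ⟨k, Or.inr hk, hy⟩
    · rintro (hy | ⟨k, (rfl | hk), (rfl | rfl)⟩)
      · exact Or.inl (Or.inl (Or.inl hy))
      · exact Or.inl (Or.inl (Or.inr rfl))
      · exact Or.inl (Or.inr rfl)
      · exact Or.inr ⟨k, hk, Or.inl rfl⟩
      · exact Or.inr ⟨k, hk, Or.inr rfl⟩

-- ===== VERDICT =====
theorem get_unique_k_minus_mers_spec : Claim_equal_get_unique_k_minus_mers := by
  intro Patterns _
  unfold Spec_get_unique_k_minus_mers get_unique_k_minus_mers get_unique_k_minus_mers_alt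
  obtain ⟨hpw, hmem⟩ := pvB_inv Patterns [] List.Pairwise.nil
  set B := Patterns.foldl (fun nodes kmer =>
      [PySem.Str.slice kmer none (some (-1)), PySem.Str.slice kmer (some 1) none].foldl
        (fun ns node => pvIns node ns) nodes) [] with hB
  set N := Patterns.foldl (fun acc kmer => (acc ++ [get_prefix kmer]) ++ [get_sufix kmer]) [] with hN
  have hndB : B.Nodup := hpw.imp (fun h => ne_of_lt h)
  have hmem2 : ∀ y, y ∈ B ↔ y ∈ PySem.Set.ofList N := by
    intro y
    rw [PySem.Set.mem_ofList, hmem y, hN, pvA_mem]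
  have hperm : B.Perm (PySem.Set.ofList N) :=
    (List.perm_ext_iff_of_nodup hndB (PySem.Set.nodup_ofList N)).mpr hmem2
  show PySem.List.sorted (PySem.Set.ofList N) (fun x => x) false = B
  exact PySem.List.sorted_eq_of_perm_of_pairwise_lt (PySem.Set.ofList N) B
    (fun x => x) hperm hpw
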